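-- pv_equiv track=rewrite | github.com/GeWangXJTU/RF-Carer | SignalProcessLayer-pythonLayer/process/pathSearch.py | segmentCreate
-- ===== SOURCE A (Python) =====
-- def segmentCreate(y_coords):
--     segments = []
--     current_segment = [y_coords[0]]
--
--     for i in range(1, len(y_coords)):
--         if abs(y_coords[i] - y_coords[i - 1]) < 5:
--             current_segment.append(y_coords[i])
--         else:
--             segments.append(current_segment)
--             current_segment = [y_coords[i]]
--
--     segments.append(current_segment)
--     return segments
-- ===== SOURCE B (Python) =====
-- def segmentCreate(y_coords):
--     n = len(y_coords)
--     breaks = [i for i in range(1, n) if abs(y_coords[i] - y_coords[i - 1]) >= 5]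
--     bounds = [0] + breaks + [n]
--     return [y_coords[bounds[k]:bounds[k + 1]] for k in range(len(bounds) - 1)]
-- ===== Notes on version B (the rewrite author's own statement) =====
-- stated objective: alternative
-- what changed: Replaced the stateful single-pass accumulation (current_segment/segments) by computing the break positions first, forming a bounds list, and slicing the input between consecutive bounds.
import Mathlib
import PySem

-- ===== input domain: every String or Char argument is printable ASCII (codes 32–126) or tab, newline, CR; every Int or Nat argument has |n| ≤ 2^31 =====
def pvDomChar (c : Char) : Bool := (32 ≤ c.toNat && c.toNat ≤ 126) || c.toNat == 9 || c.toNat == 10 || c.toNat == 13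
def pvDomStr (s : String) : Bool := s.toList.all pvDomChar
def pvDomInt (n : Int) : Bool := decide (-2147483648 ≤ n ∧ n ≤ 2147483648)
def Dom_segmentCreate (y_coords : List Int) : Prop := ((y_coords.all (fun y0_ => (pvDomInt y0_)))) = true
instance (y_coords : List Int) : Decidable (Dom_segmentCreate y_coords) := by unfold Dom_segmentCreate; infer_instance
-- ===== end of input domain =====

-- B computes break positions first and slices between consecutive bounds, instead of
-- A's stateful single-pass accumulation; same cost, different decomposition.

-- ===== PORT A =====
-- the loop body of A; the loop over i in range(1, n) reading y[i-1], y[i] is the fold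
-- over the consecutive pairs y.zip y.tail, with the same (segments, current_segment) state
def pvStepA (st : List (List Int) × List Int) (p : Int × Int) : List (List Int) × List Int :=
  if (p.2 - p.1).natAbs < 5 then (st.1, st.2 ++ [p.2]) else (st.1 ++ [st.2], [p.2])

def segmentCreate (y_coords : List Int) : List (List Int) :=
  match PySem.List.pyGet? y_coords 0 with
  | none => []  -- y_coords[0] raises IndexError here; excluded by Pre_segmentCreate
  | some h =>
    let st := (y_coords.zip y_coords.tail).foldl pvStepA ([], [h])
    st.1 ++ [st.2]

-- ===== PORT B =====
def segmentCreate_alt (y_coords : List Int) : List (List Int) :=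
  let n : Int := y_coords.length
  let breaks := (PySem.List.pyRange 1 n 1).filter
    (fun i => decide (5 ≤ ((PySem.List.pyGetD y_coords i 0) - (PySem.List.pyGetD y_coords (i - 1) 0)).natAbs))
  let bounds := 0 :: (breaks ++ [n])
  (PySem.List.pyRange 0 ((bounds.length : Int) - 1) 1).map
    (fun k => PySem.List.slice y_coords (some (PySem.List.pyGetD bounds k 0)) (some (PySem.List.pyGetD bounds (k + 1) 0)))

-- ===== PRECONDITION & SPEC =====
-- Pre_ excludes exactly the empty list, on which A raises IndexError (y_coords[0]).
def Pre_segmentCreate (y_coords : List Int) : Prop := y_coords ≠ []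
instance (y_coords : List Int) : Decidable (Pre_segmentCreate y_coords) := by unfold Pre_segmentCreate; infer_instance
def pvWitness_segmentCreate : List Int := ([1, 2, 10])

def Spec_segmentCreate (y_coords : List Int) (out : List (List Int)) : Prop := out = segmentCreate_alt y_coords
instance (y_coords : List Int) (out : List (List Int)) : Decidable (Spec_segmentCreate y_coords out) := by unfold Spec_segmentCreate; infer_instance

-- ===== CLAIM (what is proved, stated in full; the proofs are below) =====
def Claim_equal_segmentCreate : Prop := ∀ (y_coords : List Int), Dom_segmentCreate y_coords → Pre_segmentCreate y_coords → Spec_segmentCreate y_coords (segmentCreate y_coords)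

-- ===== LEMMAS AND PROOFS =====

-- canonical recursive segmentation of h :: t
def chunk : Int → List Int → List (List Int)
  | h, [] => [[h]]
  | h, x :: xs =>
    match chunk x xs with
    | [] => [[h]]  -- unreachable: chunk is never []
    | s :: rest => if (x - h).natAbs < 5 then (h :: s) :: rest else [h] :: s :: rest

lemma chunk_head : ∀ (t : List Int) (h : Int), ∃ s rest, chunk h t = (h :: s) :: rest := by
  intro t
  induction t with
  | nil => intro h; exact ⟨[], [], rfl⟩
  | cons x xs ih =>
    intro h
    obtain ⟨s', rest', hx⟩ := ih x
    by_cases hc : (x - h).natAbs < 5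
    · exact ⟨x :: s', rest', by simp [chunk, hx, hc]⟩
    · exact ⟨[], (x :: s') :: rest', by simp [chunk, hx, hc]⟩

lemma A_fold : ∀ (t : List Int) (h : Int) (segs : List (List Int)) (cur : List Int)
    (s : List Int) (rest : List (List Int)), chunk h t = (h :: s) :: rest →
    (let st := ((h :: t).zip t).foldl pvStepA (segs, cur); st.1 ++ [st.2]) = segs ++ (cur ++ s) :: rest := by
  intro t
  induction t with
  | nil =>
    intro h segs cur s rest hch
    rw [show chunk h [] = [[h]] from rfl] at hch
    injection hch with h1 h2
    injection h1 with _ h3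
    simp [← h3, ← h2]
  | cons x xs ih =>
    intro h segs cur s rest hch
    obtain ⟨s', rest', hx⟩ := chunk_head xs x
    by_cases hc : (x - h).natAbs < 5
    · simp only [chunk, hx, if_pos hc] at hch
      injection hch with h1 h2
      injection h1 with _ h3
      have hstep : pvStepA (segs, cur) (h, x) = (segs, cur ++ [x]) := by simp [pvStepA, hc]
      have hih := ih x segs (cur ++ [x]) s' rest' hx
      simp only [List.zip_cons_cons, List.foldl_cons, hstep] at *
      rw [hih]
      subst h2
      rw [← h3]
      simp
    · simp only [chunk, hx, if_neg hc] at hch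
      injection hch with h1 h2
      injection h1 with _ h3
      have hstep : pvStepA (segs, cur) (h, x) = (segs ++ [cur], [x]) := by simp [pvStepA, hc]
      have hih := ih x (segs ++ [cur]) [x] s' rest' hx
      simp only [List.zip_cons_cons, List.foldl_cons, hstep] at *
      rw [hih]
      subst h2
      rw [← h3]
      simp

lemma segmentCreate_eq_chunk (h : Int) (t : List Int) : segmentCreate (h :: t) = chunk h t := by
  obtain ⟨s, rest, hch⟩ := chunk_head t h
  have := A_fold t h [] [h] s rest hch
  simp only [segmentCreate, PySem.List.pyGet?_zero_cons, List.tail_cons]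
  simp only at this
  rw [this, hch]
  simp

-- B side ---------------------------------------------------------------

-- the break positions of h :: t, numbered from i
def pvBrk : Int → List Int → Int → List Int
  | _, [], _ => []
  | h, x :: xs, i => (if 5 ≤ (x - h).natAbs then [i] else []) ++ pvBrk x xs (i + 1)

lemma pvBrk_ge : ∀ (t : List Int) (h i j : Int), j ∈ pvBrk h t i → i ≤ j := by
  intro t
  induction t with
  | nil => intro h i j hj; simp [pvBrk] at hj
  | cons x xs ih =>
    intro h i j hj
    simp only [pvBrk, List.mem_append] at hj
    rcases hj with hj | hj
    · split at hj <;> simp at hj; omega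
    · have := ih x (i + 1) j hj; omega

lemma pyGetD_pre_append (pre : List Int) (h : Int) (z : List Int) :
    PySem.List.pyGetD (pre ++ h :: z) ((pre.length : Int)) 0 = h := by
  rw [PySem.List.pyGetD_natCast]
  simp [List.getD]

lemma brk_eq : ∀ (t pre : List Int) (h : Int),
    (PySem.List.pyRange ((pre.length : Int) + 1) (((pre ++ h :: t).length : Int)) 1).filter
      (fun i => decide (5 ≤ ((PySem.List.pyGetD (pre ++ h :: t) i 0) - (PySem.List.pyGetD (pre ++ h :: t) (i - 1) 0)).natAbs))
    = pvBrk h t ((pre.length : Int) + 1) := by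
  intro t
  induction t with
  | nil =>
    intro pre h
    rw [PySem.List.pyRange_one_eq_nil (by simp)]
    simp [pvBrk]
  | cons x xs ih =>
    intro pre h
    have hlen : ((pre ++ h :: x :: xs).length : Int) = (pre.length : Int) + 2 + xs.length := by
      simp; omega
    rw [PySem.List.pyRange_one_cons (by omega)]
    rw [List.filter_cons]
    have h1 : PySem.List.pyGetD (pre ++ h :: x :: xs) ((pre.length : Int) + 1 - 1) 0 = h := by
      simpa using pyGetD_pre_append pre h (x :: xs)
    have h2 : PySem.List.pyGetD (pre ++ h :: x :: xs) ((pre.length : Int) + 1) 0 = x := by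
      have : pre ++ h :: x :: xs = (pre ++ [h]) ++ x :: xs := by simp
      rw [this, show (pre.length : Int) + 1 = (((pre ++ [h]).length : Nat) : Int) by simp]
      exact pyGetD_pre_append (pre ++ [h]) x xs
    have hrec : (PySem.List.pyRange ((pre.length : Int) + 1 + 1) (((pre ++ h :: x :: xs).length : Int)) 1).filter
        (fun i => decide (5 ≤ ((PySem.List.pyGetD (pre ++ h :: x :: xs) i 0) - (PySem.List.pyGetD (pre ++ h :: x :: xs) (i - 1) 0)).natAbs))
        = pvBrk x xs ((pre.length : Int) + 2) := by
      have happ : pre ++ h :: x :: xs = (pre ++ [h]) ++ x :: xs := by simp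
      have := ih (pre ++ [h]) x
      rw [← happ] at this
      rw [show ((pre ++ [h]).length : Int) + 1 = (pre.length : Int) + 1 + 1 by simp] at this
      rw [show (pre.length : Int) + 2 = (pre.length : Int) + 1 + 1 by ring]
      exact this
    rw [hrec, h1, h2]
    have harg : (pre.length : Int) + 1 + 1 = (pre.length : Int) + 2 := by ring
    by_cases hc : 5 ≤ (x - h).natAbs
    · simp only [pvBrk]
      simp [hc, harg]
    · simp only [pvBrk]
      simp [hc, harg]

lemma pyGetD_cons_succ (z : List Int) (a : Int) (i : Int) (d : Int) (hi : 0 ≤ i) :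
    PySem.List.pyGetD (a :: z) (i + 1) d = PySem.List.pyGetD z i d := by
  obtain ⟨n, rfl⟩ := Int.eq_ofNat_of_zero_le hi
  rw [show ((n : Int) + 1) = (((n + 1 : Nat) : Int)) by push_cast; ring]
  rw [PySem.List.pyGetD_natCast, PySem.List.pyGetD_natCast]
  simp [List.getD]

lemma pyRange_shift (a b : Int) :
    PySem.List.pyRange (a + 1) (b + 1) 1 = (PySem.List.pyRange a b 1).map (· + 1) := by
  rw [PySem.List.pyRange_one, PySem.List.pyRange_one, List.map_map]
  rw [show (b + 1 - (a + 1)) = b - a by ring]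
  apply List.map_congr_left
  intro k _
  simp
  ring

lemma mapRange_zip (g : Int → Int → List Int) :
    ∀ (r : List Int) (a : Int),
    (PySem.List.pyRange 0 ((r.length : Int)) 1).map
      (fun k => g (PySem.List.pyGetD (a :: r) k 0) (PySem.List.pyGetD (a :: r) (k + 1) 0))
    = ((a :: r).zip r).map (fun p => g p.1 p.2) := by
  intro r
  induction r with
  | nil => intro a; simp
  | cons b r' ih =>
    intro a
    rw [show ((b :: r').length : Int) = (r'.length : Int) + 1 by simp]
    rw [PySem.List.pyRange_one_cons (by omega)]
    simp only [List.map_cons]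
    rw [PySem.List.pyGetD_zero_cons]
    rw [show (0 : Int) + 1 = 0 + 1 from rfl, pyGetD_cons_succ _ _ _ _ (by omega),
        PySem.List.pyGetD_zero_cons]
    rw [show PySem.List.pyRange (0 + 1) ((r'.length : Int) + 1) 1
          = (PySem.List.pyRange 0 ((r'.length : Int)) 1).map (· + 1) from pyRange_shift 0 _]
    rw [List.map_map]
    have htail : (PySem.List.pyRange 0 ((r'.length : Int)) 1).map
        ((fun k => g (PySem.List.pyGetD (a :: b :: r') k 0) (PySem.List.pyGetD (a :: b :: r') (k + 1) 0)) ∘ (· + 1))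
        = (PySem.List.pyRange 0 ((r'.length : Int)) 1).map
          (fun k => g (PySem.List.pyGetD (b :: r') k 0) (PySem.List.pyGetD (b :: r') (k + 1) 0)) := by
      apply List.map_congr_left
      intro k hk
      have hk0 : 0 ≤ k := (PySem.List.mem_pyRange_one.mp hk).1
      simp only [Function.comp]
      rw [pyGetD_cons_succ _ _ _ _ hk0, pyGetD_cons_succ _ _ _ _ (by omega)]
    rw [htail, ih b]
    simp [List.zip_cons_cons]

lemma slice_cons_split (pre : List Int) (h : Int) (z : List Int) (b : Int)
    (hb : (pre.length : Int) + 1 ≤ b) :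
    PySem.List.slice (pre ++ h :: z) (some ((pre.length : Int))) (some b)
    = h :: PySem.List.slice (pre ++ h :: z) (some ((pre.length : Int) + 1)) (some b) := by
  rw [PySem.List.slice_toNat _ (by omega) (by omega),
      PySem.List.slice_toNat _ (by omega) (by omega)]
  have hd1 : (pre ++ h :: z).drop ((pre.length : Int)).toNat = h :: z := by
    rw [show ((pre.length : Int)).toNat = pre.length by omega]
    exact List.drop_left
  have hd2 : (pre ++ h :: z).drop (((pre.length : Int) + 1)).toNat = z := by
    rw [show (((pre.length : Int) + 1)).toNat = (pre ++ [h]).length by simp,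
        show pre ++ h :: z = (pre ++ [h]) ++ z by simp]
    exact List.drop_left
  rw [hd1, hd2]
  rw [show (b.toNat - ((pre.length : Int)).toNat) = (b.toNat - (((pre.length : Int) + 1)).toNat) + 1 by omega]
  simp [List.take_succ_cons]

lemma slice_empty (y : List Int) (a : Int) (ha : 0 ≤ a) :
    PySem.List.slice y (some a) (some a) = [] := by
  rw [PySem.List.slice_toNat _ ha ha]
  simp

lemma slices_chunk : ∀ (t pre : List Int) (h : Int),
    ((((pre.length : Int)) :: (pvBrk h t ((pre.length : Int) + 1) ++ [(((pre ++ h :: t).length : Int))])).zip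
       (pvBrk h t ((pre.length : Int) + 1) ++ [(((pre ++ h :: t).length : Int))])).map
      (fun p => PySem.List.slice (pre ++ h :: t) (some p.1) (some p.2))
    = chunk h t := by
  intro t
  induction t with
  | nil =>
    intro pre h
    have hN : (((pre ++ [h]).length : Nat) : Int) = (pre.length : Int) + 1 := by simp
    simp only [pvBrk, List.nil_append, List.zip_cons_cons, List.zip_nil_right,
      List.map_cons, List.map_nil, hN]
    rw [slice_cons_split pre h [] ((pre.length : Int) + 1) (by omega)]
    rw [slice_empty _ _ (by omega)]
    rfl
  | cons x xs ih =>
    intro pre h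
    obtain ⟨s', rest', hx⟩ := chunk_head xs x
    have hy : pre ++ h :: x :: xs = (pre ++ [h]) ++ x :: xs := by simp
    have hih := ih (pre ++ [h]) x
    rw [← hy] at hih
    rw [show (((pre ++ [h]).length : Nat) : Int) = (pre.length : Int) + 1 by simp] at hih
    rw [show ((pre.length : Int) + 1) + 1 = (pre.length : Int) + 2 by ring] at hih
    rw [hx] at hih
    have hNge : (pre.length : Int) + 2 ≤ (((pre ++ h :: x :: xs).length : Nat) : Int) := by
      simp; omega
    by_cases hc : 5 ≤ (x - h).natAbs
    · have hbrk : pvBrk h (x :: xs) ((pre.length : Int) + 1)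
          = ((pre.length : Int) + 1) :: pvBrk x xs ((pre.length : Int) + 2) := by
        simp [pvBrk, hc]
        ring_nf
      rw [hbrk]
      simp only [List.cons_append, List.zip_cons_cons, List.map_cons]
      rw [slice_cons_split pre h (x :: xs) ((pre.length : Int) + 1) (by omega)]
      rw [slice_empty _ _ (by omega)]
      rw [hih]
      simp [chunk, hx, show ¬ ((x - h).natAbs < 5) by omega]
    · have hbrk : pvBrk h (x :: xs) ((pre.length : Int) + 1)
          = pvBrk x xs ((pre.length : Int) + 2) := by
        simp [pvBrk, hc]
        ring_nf
      rw [hbrk]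
      rw [hbrk] at *
      obtain ⟨r, rs, hR⟩ := List.exists_cons_of_ne_nil
        (show pvBrk x xs ((pre.length : Int) + 2) ++ [(((pre ++ h :: x :: xs).length : Nat) : Int)] ≠ [] by simp)
      have hrge : (pre.length : Int) + 2 ≤ r := by
        have hmem : r ∈ pvBrk x xs ((pre.length : Int) + 2) ++ [(((pre ++ h :: x :: xs).length : Nat) : Int)] := by
          rw [hR]; exact List.mem_cons_self
        rcases List.mem_append.mp hmem with hm | hm
        · exact pvBrk_ge _ _ _ _ hm
        · simp at hm; omega
      rw [hR]
      rw [hR] at hih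
      simp only [List.zip_cons_cons, List.map_cons] at hih ⊢
      have hs1 : PySem.List.slice (pre ++ h :: x :: xs) (some ((pre.length : Int))) (some r)
          = h :: PySem.List.slice (pre ++ h :: x :: xs) (some ((pre.length : Int) + 1)) (some r) :=
        slice_cons_split pre h (x :: xs) r (by omega)
      rw [hs1]
      obtain ⟨h1, h2⟩ := List.cons.injEq _ _ _ _ ▸ hih
      rw [h1, h2]
      simp [chunk, hx, show (x - h).natAbs < 5 by omega]

lemma brk_eq0 (h : Int) (t : List Int) :
    (PySem.List.pyRange 1 (((h :: t).length : Int)) 1).filter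
      (fun i => decide (5 ≤ ((PySem.List.pyGetD (h :: t) i 0) - (PySem.List.pyGetD (h :: t) (i - 1) 0)).natAbs))
    = pvBrk h t 1 := by
  have := brk_eq t [] h
  simpa using this

lemma segmentCreate_alt_eq_chunk (h : Int) (t : List Int) :
    segmentCreate_alt (h :: t) = chunk h t := by
  simp only [segmentCreate_alt]
  have hbrk := brk_eq t [] h
  simp only [List.nil_append, List.length_nil, Nat.cast_zero, zero_add] at hbrk
  rw [brk_eq0]
  have hlen : (((0 : Int) :: (pvBrk h t 1 ++ [((h :: t).length : Int)])).length : Int) - 1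
      = ((pvBrk h t 1 ++ [((h :: t).length : Int)]).length : Int) := by
    simp
  rw [hlen]
  rw [mapRange_zip (fun a b => PySem.List.slice (h :: t) (some a) (some b))
      (pvBrk h t 1 ++ [((h :: t).length : Int)]) 0]
  have := slices_chunk t [] h
  simp only [List.nil_append, List.length_nil, Nat.cast_zero, zero_add] at this
  exact this

-- ===== VERDICT (by name: the statement is the Claim_ definition above) =====
theorem segmentCreate_spec : Claim_equal_segmentCreate := by
  intro y hdom hpre
  unfold Spec_segmentCreate
  cases y with
  | nil => exact absurd rfl hpre
  | cons h t => rw [segmentCreate_eq_chunk, segmentCreate_alt_eq_chunk]
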